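-- pv_equiv track=rewrite | github.com/ssl-hep/ServiceX_frontend | servicex_analysis_utils/file_peeking.py | parse_jagged_depth_and_dtype
-- ===== SOURCE A (Python) =====
-- def parse_jagged_depth_and_dtype(dtype_str):
--     """
--     Helper to decode the dtype str for each branch.
--
--     Parses uproot-style interpretation strings such as:
--     - "AsJagged(AsJagged(AsDtype('>f4')))"
--
--     Returns the number of nested layers and the inner dtype.
--     Used in str_to_array to reconstruct the ak.array.
--
--     Parameters:
--         dtype_str (str): The dtype part of a branch info str; from the delivered file structure.
--
--     Returns:
--         int, str: jagged_depth, base_numpy_dtype_str or None if not recognized.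
--     """
--     depth = 0
--     current = dtype_str.strip()
--
--     # Count how many nested AsJagged(...) wrappers exist
--     while current.startswith("AsJagged("):
--         depth += 1
--         current = current[
--             len("AsJagged(") : -1
--         ].strip()  # Strip outermost wrapper, up to -1 to remove )
--
--     # Extract the base dtype string from AsDtype('<np-format>')
--     if current.startswith("AsDtype('") and current.endswith("')"):
--         base_dtype = current[len("AsDtype('") : -2]
--         return depth, base_dtype
--     else:
--         return depth, None
-- ===== SOURCE B (Python) =====
-- def parse_jagged_depth_and_dtype(dtype_str):
--     """Index-based scan: keeps two cursors (i, j) into the original string and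
--     never builds intermediate slices; one O(n) pass instead of re-slicing and
--     re-stripping a new string per wrapper."""
--     s = dtype_str
--     i, j = 0, len(s)
--     depth = 0
--     while True:
--         while i < j and s[i].isspace():
--             i += 1
--         while i < j and s[j - 1].isspace():
--             j -= 1
--         if j - i >= 9 and s[i:i + 9] == "AsJagged(":
--             depth += 1
--             i += 9
--             j -= 1
--         else:
--             break
--     if j - i >= 9 and s[i:i + 9] == "AsDtype('" and s[j - 2:j] == "')":
--         return depth, s[i + 9:j - 2]
--     return depth, None
-- ===== Notes on version B (the rewrite author's own statement) =====
-- stated objective: faster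
-- what changed: Replaces A's loop that builds a freshly sliced and re-stripped string per AsJagged wrapper by a single two-cursor scan (indices i, j) over the original string that never allocates intermediate strings.
import Mathlib
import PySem

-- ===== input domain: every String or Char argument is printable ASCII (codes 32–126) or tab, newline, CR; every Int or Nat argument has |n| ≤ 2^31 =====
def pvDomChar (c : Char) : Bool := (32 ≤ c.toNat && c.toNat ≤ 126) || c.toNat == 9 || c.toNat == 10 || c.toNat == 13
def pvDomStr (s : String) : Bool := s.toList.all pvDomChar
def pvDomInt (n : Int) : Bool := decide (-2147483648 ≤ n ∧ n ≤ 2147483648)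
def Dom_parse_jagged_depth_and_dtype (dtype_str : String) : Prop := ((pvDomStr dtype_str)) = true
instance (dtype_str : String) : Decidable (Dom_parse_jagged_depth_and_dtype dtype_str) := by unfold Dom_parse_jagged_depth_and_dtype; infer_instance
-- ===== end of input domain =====

-- B replaces A's slice-and-restrip loop over fresh strings by a two-cursor scan over the
-- original string (indices i, j only); same return value, no intermediate strings built.

-- ===== PORT A =====
-- Termination helper for A's loop (the loop body strictly shrinks `current`).
lemma pvStripSliceLen_lt (cs : List Char) (h : 9 ≤ cs.length) :
    (PySem.Chars.strip (PySem.List.slice cs (some 9) (some (-1)))).length < cs.length := by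
  have h1 : ∀ l : List Char, (PySem.Chars.strip l).length ≤ l.length := by
    intro l
    simp only [PySem.Chars.strip, PySem.Chars.rstrip, PySem.Chars.lstrip, List.length_reverse]
    exact le_trans (List.length_dropWhile_le _ _)
      (by rw [List.length_reverse]; exact List.length_dropWhile_le _ _)
  have h2 : (PySem.List.slice cs (some 9) (some (-1))).length < cs.length := by
    rw [PySem.List.length_slice, PySem.List.clampIdx_neg_one]
    omega
  exact lt_of_le_of_lt (h1 _) h2

lemma pvStartsJagged_len (cs : List Char)
    (h : PySem.Chars.startswith cs "AsJagged(".toList = true) : 9 ≤ cs.length := by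
  have := (PySem.Chars.startswith_iff cs "AsJagged(".toList).mp h
  simpa using this.length_le

-- A's while-loop over `current` with accumulator `depth`; len("AsJagged(") = 9, len("AsDtype('") = 9 written as the literal 9.
def pvLoopA (current : List Char) (depth : Int) : Int × Option String :=
  if h : PySem.Chars.startswith current "AsJagged(".toList then
    pvLoopA (PySem.Chars.strip (PySem.List.slice current (some 9) (some (-1)))) (depth + 1)
  else if PySem.Chars.startswith current "AsDtype('".toList && PySem.Chars.endswith current "')".toList then
    (depth, some (String.ofList (PySem.List.slice current (some 9) (some (-2)))))
  else
    (depth, none)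
termination_by current.length
decreasing_by exact pvStripSliceLen_lt current (pvStartsJagged_len current h)

def parse_jagged_depth_and_dtype (dtype_str : String) : Int × Option String :=
  pvLoopA (PySem.Chars.strip dtype_str.toList) 0

-- ===== PORT B =====
-- B's inner whitespace loops: `while i < j and s[i].isspace(): i += 1` and the right-hand twin.
def pvLskip (cs : List Char) (i j : Nat) : Nat :=
  if i < j ∧ PySem.Chars.isspace (cs.getD i ' ') = true then pvLskip cs (i + 1) j else i
termination_by j - i

def pvRskip (cs : List Char) (i j : Nat) : Nat :=
  if i < j ∧ PySem.Chars.isspace (cs.getD (j - 1) ' ') = true then pvRskip cs i (j - 1) else j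
termination_by j

lemma pvLskip_ge (cs : List Char) (i j : Nat) : i ≤ pvLskip cs i j := by
  induction i using pvLskip.induct (cs := cs) (j := j) with
  | case1 i h ih => rw [pvLskip, if_pos h]; omega
  | case2 i h => rw [pvLskip, if_neg h]

lemma pvRskip_le (cs : List Char) (i j : Nat) : pvRskip cs i j ≤ j := by
  induction j using pvRskip.induct (cs := cs) (i := i) with
  | case1 j h ih => rw [pvRskip, if_pos h]; omega
  | case2 j h => rw [pvRskip, if_neg h]

-- B's outer loop: skip whitespace at both cursors, then either peel one wrapper (i += 9, j -= 1)
-- or leave the loop and classify s[i:j]; slices s[a:b] of natural a ≤ b are (drop a).take (b - a).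
def pvLoopB (cs : List Char) (i j : Nat) (depth : Int) : Int × Option String :=
  let i' := pvLskip cs i j
  let j' := pvRskip cs i' j
  if h : i' + 9 ≤ j' ∧ (cs.drop i').take 9 = "AsJagged(".toList then
    pvLoopB cs (i' + 9) (j' - 1) (depth + 1)
  else if i' + 9 ≤ j' ∧ (cs.drop i').take 9 = "AsDtype('".toList ∧ (cs.drop (j' - 2)).take 2 = "')".toList then
    (depth, some (String.ofList ((cs.drop (i' + 9)).take (j' - 2 - (i' + 9)))))
  else
    (depth, none)
termination_by j - i
decreasing_by
  have h1 : i ≤ pvLskip cs i j := pvLskip_ge cs i j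
  have h2 : pvRskip cs (pvLskip cs i j) j ≤ j := pvRskip_le cs (pvLskip cs i j) j
  have h3 : pvLskip cs i j + 9 ≤ pvRskip cs (pvLskip cs i j) j := h.1
  omega

def parse_jagged_depth_and_dtype_alt (dtype_str : String) : Int × Option String :=
  pvLoopB dtype_str.toList 0 dtype_str.toList.length 0

-- ===== PRECONDITION & SPEC =====
def Spec_parse_jagged_depth_and_dtype (dtype_str : String) (out : Int × Option String) : Prop := out = parse_jagged_depth_and_dtype_alt dtype_str
instance (dtype_str : String) (out : Int × Option String) : Decidable (Spec_parse_jagged_depth_and_dtype dtype_str out) := by unfold Spec_parse_jagged_depth_and_dtype; infer_instance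

-- ===== CLAIM (what is proved, stated in full; the proofs are below) =====
def Claim_equal_parse_jagged_depth_and_dtype : Prop := ∀ (dtype_str : String), Dom_parse_jagged_depth_and_dtype dtype_str → Spec_parse_jagged_depth_and_dtype dtype_str (parse_jagged_depth_and_dtype dtype_str)

-- ===== LEMMAS AND PROOFS =====
lemma pvLskip_le (cs : List Char) (i j : Nat) : i ≤ j → pvLskip cs i j ≤ j := by
  induction i using pvLskip.induct (cs := cs) (j := j) with
  | case1 i h ih => intro _; rw [pvLskip, if_pos h]; exact ih h.1
  | case2 i h => intro hij; rw [pvLskip, if_neg h]; exact hij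

lemma pvRskip_ge (cs : List Char) (i j : Nat) : i ≤ j → i ≤ pvRskip cs i j := by
  induction j using pvRskip.induct (cs := cs) (i := i) with
  | case1 j h ih => intro _; rw [pvRskip, if_pos h]; exact ih (by omega)
  | case2 j h => intro hij; rw [pvRskip, if_neg h]; exact hij

-- `(cs.drop i).take (j - i)` is the window s[i:j]; cons/snoc decompositions of a nonempty window.
lemma pvSub_cons (cs : List Char) (i j : Nat) (hij : i < j) (hj : j ≤ cs.length) :
    (cs.drop i).take (j - i) = cs.getD i ' ' :: (cs.drop (i + 1)).take (j - (i + 1)) := by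
  have hi : i < cs.length := by omega
  rw [List.drop_eq_getElem_cons hi]
  rw [show j - i = (j - (i + 1)) + 1 by omega]
  rw [List.take_succ_cons, List.getD_eq_getElem cs ' ' hi]

lemma pvSub_snoc (cs : List Char) (i j : Nat) (_hij : i < j) (hj : j ≤ cs.length) :
    (cs.drop i).take (j - i) = (cs.drop i).take (j - 1 - i) ++ [cs.getD (j - 1) ' '] := by
  have h1 : j - 1 < cs.length := by omega
  rw [show j - i = (j - 1 - i) + 1 by omega, List.take_add_one]
  have h2 : i + (j - 1 - i) < cs.length := by omega
  rw [List.getElem?_drop, List.getElem?_eq_getElem h2]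
  rw [List.getD_eq_getElem cs ' ' h1]
  simp
  congr 1
  omega

lemma pvLen_sub (cs : List Char) (i j : Nat) (hij : i ≤ j) (hj : j ≤ cs.length) :
    ((cs.drop i).take (j - i)).length = j - i := by
  simp; omega

-- lstrip of the window moves the left cursor to pvLskip.
lemma pvLstrip_sub (cs : List Char) (j : Nat) (hj : j ≤ cs.length) (i : Nat) : i ≤ j →
    List.dropWhile PySem.Chars.isspace ((cs.drop i).take (j - i))
      = (cs.drop (pvLskip cs i j)).take (j - pvLskip cs i j) := by
  induction i using pvLskip.induct (cs := cs) (j := j) with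
  | case1 i h ih =>
    intro _
    rw [pvLskip, if_pos h, pvSub_cons cs i j h.1 hj, List.dropWhile_cons_of_pos h.2]
    exact ih (by omega)
  | case2 i h =>
    intro hij
    rw [pvLskip, if_neg h]
    rcases Nat.lt_or_ge i j with hlt | hge
    · have hns : PySem.Chars.isspace (cs.getD i ' ') = false := by
        cases hb : PySem.Chars.isspace (cs.getD i ' ') with
        | false => rfl
        | true => exact absurd ⟨hlt, hb⟩ h
      rw [pvSub_cons cs i j hlt hj, List.dropWhile_cons_of_neg (by simpa [List.getD] using hns)]
    · have : j - i = 0 := by omega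
      simp [this]

-- rstrip of the window moves the right cursor to pvRskip.
lemma pvRstrip_sub (cs : List Char) (i : Nat) (j : Nat) : i ≤ j → j ≤ cs.length →
    PySem.Chars.rstrip ((cs.drop i).take (j - i))
      = (cs.drop i).take (pvRskip cs i j - i) := by
  induction j using pvRskip.induct (cs := cs) (i := i) with
  | case1 j h ih =>
    intro hij hj
    rw [pvRskip, if_pos h, pvSub_snoc cs i j h.1 hj]
    have hstep : PySem.Chars.rstrip ((cs.drop i).take (j - 1 - i) ++ [cs.getD (j - 1) ' '])
        = PySem.Chars.rstrip ((cs.drop i).take (j - 1 - i)) := by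
      simp only [PySem.Chars.rstrip, List.reverse_append, List.reverse_singleton,
        List.singleton_append]
      rw [List.dropWhile_cons_of_pos h.2]
    rw [hstep]
    exact ih (by omega) (by omega)
  | case2 j h =>
    intro hij hj
    rw [pvRskip, if_neg h]
    rcases Nat.lt_or_ge i j with hlt | hge
    · have hns : PySem.Chars.isspace (cs.getD (j - 1) ' ') = false := by
        cases hb : PySem.Chars.isspace (cs.getD (j - 1) ' ') with
        | false => rfl
        | true => exact absurd ⟨hlt, hb⟩ h
      rw [pvSub_snoc cs i j hlt hj]
      simp only [PySem.Chars.rstrip, List.reverse_append, List.reverse_singleton,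
        List.singleton_append]
      rw [List.dropWhile_cons_of_neg (by simpa [List.getD] using hns)]
      simp
    · have : j - i = 0 := by omega
      simp [this, PySem.Chars.rstrip]

-- startswith on the window tested by cursor arithmetic.
lemma pvStarts_sub (cs : List Char) (i j : Nat) (p : List Char) (hij : i ≤ j) (hj : j ≤ cs.length) :
    (PySem.Chars.startswith ((cs.drop i).take (j - i)) p = true)
      ↔ (i + p.length ≤ j ∧ (cs.drop i).take p.length = p) := by
  rw [PySem.Chars.startswith_iff]
  constructor
  · intro hpre
    have hlen := hpre.length_le
    rw [pvLen_sub cs i j hij hj] at hlen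
    have htake : ((cs.drop i).take (j - i)).take p.length = p := List.prefix_iff_eq_take.mp hpre ▸ rfl
    rw [List.take_take, Nat.min_eq_left (by omega)] at htake
    exact ⟨by omega, htake⟩
  · intro ⟨h1, h2⟩
    apply List.prefix_iff_eq_take.mpr
    rw [List.take_take, Nat.min_eq_left (by omega), h2]

-- endswith "')" on the window tested by cursor arithmetic (window of length ≥ 2).
lemma pvEnds_sub (cs : List Char) (i j : Nat) (hij : i + 2 ≤ j) (hj : j ≤ cs.length) :
    (PySem.Chars.endswith ((cs.drop i).take (j - i)) "')".toList = true)
      ↔ (cs.drop (j - 2)).take 2 = "')".toList := by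
  rw [PySem.Chars.endswith_iff]
  have hlen : ((cs.drop i).take (j - i)).length = j - i := pvLen_sub cs i j (by omega) hj
  constructor
  · intro hsuf
    have := List.suffix_iff_eq_drop.mp hsuf
    rw [hlen] at this
    rw [show ("')".toList.length) = 2 from rfl] at this
    rw [List.drop_take, List.drop_drop] at this
    rw [show j - i - (j - i - 2) = 2 by omega, show i + (j - i - 2) = j - 2 by omega] at this
    exact this.symm
  · intro h
    apply List.suffix_iff_eq_drop.mpr
    rw [hlen, show ("')".toList.length) = 2 from rfl]
    rw [List.drop_take, List.drop_drop]
    rw [show j - i - (j - i - 2) = 2 by omega, show i + (j - i - 2) = j - 2 by omega]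
    exact h.symm

-- Python slices l[9:-1] and l[9:-2] in drop/take form.
lemma pvSlice_nine_neg_one (l : List Char) :
    PySem.List.slice l (some 9) (some (-1)) = (l.drop 9).take (l.length - 1 - 9) := by
  rcases l with _ | ⟨c, t⟩
  · rfl
  · simp [PySem.List.slice, PySem.List.clampIdx]
    rw [if_neg (by omega)]
    rcases Nat.lt_or_ge t.length 8 with h8 | h8
    · rw [Nat.min_eq_right (by omega)]
      rw [show t.length - (t.length + 1) = 0 by omega]
      rw [List.drop_eq_nil_of_le (show t.length ≤ 8 by omega)]
      simp
    · rw [Nat.min_eq_left (by omega)]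
      rw [show (9 : Nat) = 8 + 1 from rfl, List.drop_succ_cons]

lemma pvSlice_nine_neg_two (l : List Char) :
    PySem.List.slice l (some 9) (some (-2)) = (l.drop 9).take (l.length - 2 - 9) := by
  rcases l with _ | ⟨c, t⟩
  · rfl
  · simp [PySem.List.slice, PySem.List.clampIdx]
    by_cases ht : t = []
    · subst ht; simp
    · rw [if_neg ht]
      rw [show (((t.length : Int)) + 1 + -2).toNat = t.length - 1 by omega]
      rcases Nat.lt_or_ge t.length 8 with h8 | h8
      · rw [Nat.min_eq_right (by omega)]
        rw [show t.length - 1 - (t.length + 1) = 0 by omega]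
        rw [List.drop_eq_nil_of_le (show t.length ≤ 8 by omega)]
        simp
      · rw [Nat.min_eq_left (by omega)]
        rw [show (9 : Nat) = 8 + 1 from rfl, List.drop_succ_cons]

-- Main loop correspondence: B's cursor loop equals A's loop on the stripped window.
lemma pvLoopB_eq_pvLoopA (cs : List Char) : ∀ (n i j : Nat) (d : Int), j - i ≤ n → j ≤ cs.length →
    pvLoopB cs i j d = pvLoopA (PySem.Chars.strip ((cs.drop i).take (j - i))) d := by
  intro n
  induction n with
  | zero =>
    intro i j d hn hj
    have h0 : j - i = 0 := by omega
    rw [pvLoopB.eq_def]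
    simp only []
    have hl : pvLskip cs i j = i := by
      rw [pvLskip, if_neg (by rintro ⟨h1, _⟩; omega)]
    have hr : pvRskip cs i j = j := by
      rw [pvRskip, if_neg (by rintro ⟨h1, _⟩; omega)]
    rw [hl, hr]
    rw [dif_neg (by rintro ⟨h1, _⟩; omega)]
    simp [h0, PySem.Chars.strip, PySem.Chars.lstrip, PySem.Chars.rstrip]
    rw [if_neg (by rintro ⟨h1, -, -⟩; omega)]
    rw [pvLoopA]
    simp [PySem.Chars.startswith]
  | succ n ih =>
    intro i j d hn hj
    rcases Nat.lt_or_ge j i with hlt' | hge'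
    · -- empty window: same as the base case
      have hge : j ≤ i := by omega
      have h0 : j - i = 0 := by omega
      rw [pvLoopB.eq_def]
      simp only []
      have hl : pvLskip cs i j = i := by
        rw [pvLskip, if_neg (by rintro ⟨h1, _⟩; omega)]
      have hr : pvRskip cs i j = j := by
        rw [pvRskip, if_neg (by rintro ⟨h1, _⟩; omega)]
      rw [hl, hr]
      rw [dif_neg (by rintro ⟨h1, _⟩; omega)]
      simp [h0, PySem.Chars.strip, PySem.Chars.lstrip, PySem.Chars.rstrip]
      rw [if_neg (by rintro ⟨h1, -, -⟩; omega)]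
      rw [pvLoopA]
      simp [PySem.Chars.startswith]
    · set i' := pvLskip cs i j with hi'
      set j' := pvRskip cs i' j with hj'
      have hii' : i ≤ i' := pvLskip_ge cs i j
      have hi'j : i' ≤ j := pvLskip_le cs i j (by omega)
      have hj'le : j' ≤ j := pvRskip_le cs i' j
      have hi'j' : i' ≤ j' := pvRskip_ge cs i' j hi'j
      -- strip of the window is the window at the moved cursors
      have hstrip : PySem.Chars.strip ((cs.drop i).take (j - i)) = (cs.drop i').take (j' - i') := by
        rw [PySem.Chars.strip, PySem.Chars.lstrip]
        rw [pvLstrip_sub cs j hj i (by omega), ← hi']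
        rw [pvRstrip_sub cs i' j hi'j hj, ← hj']
      rw [hstrip, pvLoopB.eq_def]
      simp only [← hi', ← hj']
      rw [pvLoopA]
      have hJ := pvStarts_sub cs i' j' "AsJagged(".toList hi'j' (by omega)
      have hD := pvStarts_sub cs i' j' "AsDtype('".toList hi'j' (by omega)
      rw [show ("AsJagged(".toList.length) = 9 from rfl] at hJ
      rw [show ("AsDtype('".toList.length) = 9 from rfl] at hD
      by_cases hcJ : i' + 9 ≤ j' ∧ (cs.drop i').take 9 = "AsJagged(".toList
      · rw [dif_pos hcJ, dif_pos (hJ.mpr hcJ)]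
        -- the sliced-and-stripped argument of A is the window at (i'+9, j'-1)
        have hsl : PySem.List.slice ((cs.drop i').take (j' - i')) (some 9) (some (-1))
            = (cs.drop (i' + 9)).take (j' - 1 - (i' + 9)) := by
          rw [pvSlice_nine_neg_one, pvLen_sub cs i' j' hi'j' (by omega)]
          rw [List.drop_take, List.drop_drop, List.take_take]
          rw [Nat.min_eq_left (by omega)]
          congr 1
          omega
        rw [hsl]
        exact ih (i' + 9) (j' - 1) (d + 1) (by omega) (by omega)
      · rw [dif_neg hcJ, dif_neg (fun hb => hcJ (hJ.mp hb))]
        by_cases hcD : i' + 9 ≤ j' ∧ (cs.drop i').take 9 = "AsDtype('".toList ∧ (cs.drop (j' - 2)).take 2 = "')".toList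
        · have hE := pvEnds_sub cs i' j' (by omega) (by omega)
          rw [if_pos hcD, if_pos (by rw [Bool.and_eq_true, hD, hE]; exact ⟨⟨hcD.1, hcD.2.1⟩, hcD.2.2⟩)]
          have hsl : PySem.List.slice ((cs.drop i').take (j' - i')) (some 9) (some (-2))
              = (cs.drop (i' + 9)).take (j' - 2 - (i' + 9)) := by
            rw [pvSlice_nine_neg_two, pvLen_sub cs i' j' hi'j' (by omega)]
            rw [List.drop_take, List.drop_drop, List.take_take]
            rw [Nat.min_eq_left (by omega)]
            congr 1
            omega
          rw [hsl]
        · rw [if_neg hcD]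
          rw [if_neg (by
            rw [Bool.and_eq_true, hD]
            rintro ⟨⟨h1, h2⟩, h3⟩
            exact hcD ⟨h1, h2, (pvEnds_sub cs i' j' (by omega) (by omega)).mp h3⟩)]

-- ===== VERDICT (by name: the statement is the Claim_ definition above) =====
theorem parse_jagged_depth_and_dtype_spec : Claim_equal_parse_jagged_depth_and_dtype := by
  intro s _
  unfold Spec_parse_jagged_depth_and_dtype parse_jagged_depth_and_dtype parse_jagged_depth_and_dtype_alt
  rw [pvLoopB_eq_pvLoopA s.toList s.toList.length 0 s.toList.length 0 (by omega) (by omega)]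
  simp only [List.drop_zero, Nat.sub_zero, List.take_length]
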